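-- pv_equiv track=rewrite | github.com/branch2836/lchs_flask_intro | hexcode.py | valid_hex_chars
-- ===== SOURCE A (Python) =====
-- def valid_hex_chars(hex):
--     valid = "1234567890abcdefABCDEF"
--     isValid = True
--     for char in hex:
--         if char not in valid:
--             isValid = False
--             break;
--
--     return isValid
-- ===== SOURCE B (Python) =====
-- def valid_hex_chars(hex):
--     # Counting approach: the 22 valid characters are pairwise distinct, so the
--     # sum of their occurrence counts equals the number of valid characters in
--     # `hex`; that equals len(hex) exactly when every character is valid.
--     valid = "1234567890abcdefABCDEF"
--     return sum(hex.count(c) for c in valid) == len(hex)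
-- ===== Notes on version B (the rewrite author's own statement) =====
-- stated objective: alternative
-- what changed: Instead of scanning hex once with a boolean flag and early break testing each character against the valid string, B iterates over the 22 valid characters, sums hex.count(c) over them, and compares the total occurrence count to len(hex); no per-character membership test, flag or break remains.
import Mathlib
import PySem

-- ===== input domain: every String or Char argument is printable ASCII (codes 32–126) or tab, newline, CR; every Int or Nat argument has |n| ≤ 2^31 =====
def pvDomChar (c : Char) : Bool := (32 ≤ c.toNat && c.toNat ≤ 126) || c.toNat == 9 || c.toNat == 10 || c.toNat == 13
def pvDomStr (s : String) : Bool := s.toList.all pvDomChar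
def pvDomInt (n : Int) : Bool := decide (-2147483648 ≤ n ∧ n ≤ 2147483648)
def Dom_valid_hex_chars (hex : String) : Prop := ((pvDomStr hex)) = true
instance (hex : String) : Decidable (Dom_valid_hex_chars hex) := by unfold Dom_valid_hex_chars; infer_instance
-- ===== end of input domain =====

-- B replaces A's single scan with flag and early break by summing the occurrence
-- counts of the 22 valid characters and comparing the total to len(hex)
-- (objective: alternative algorithm, similar cost).

-- ===== PORT A =====
-- A's loop with its boolean flag and break: recursion over the characters carrying the
-- flag and the local variable `valid`; the break returns the flag value early.
def validHexLoopA (valid : List Char) : List Char → Bool → Bool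
  | [], isValid => isValid
  | c :: cs, isValid =>
    if ¬ (valid.contains c) then
      false  -- isValid = False; break
    else
      validHexLoopA valid cs isValid

def valid_hex_chars (hex : String) : Bool :=
  validHexLoopA "1234567890abcdefABCDEF".toList hex.toList true

-- ===== PORT B =====
-- sum(hex.count(c) for c in valid) == len(hex); hex.count(c) for a one-character
-- needle c is exactly the character count, ported as List.count.
def valid_hex_chars_alt (hex : String) : Bool :=
  decide ((("1234567890abcdefABCDEF".toList.map (fun c => hex.toList.count c)).sum)
            = hex.toList.length)

-- ===== PRECONDITION & SPEC =====
def Spec_valid_hex_chars (hex : String) (out : Bool) : Prop := out = valid_hex_chars_alt hex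
instance (hex : String) (out : Bool) : Decidable (Spec_valid_hex_chars hex out) := by unfold Spec_valid_hex_chars; infer_instance

-- ===== CLAIM (what is proved, stated in full; the proofs are below) =====
def Claim_equal_valid_hex_chars : Prop := ∀ (hex : String), Dom_valid_hex_chars hex → Spec_valid_hex_chars hex (valid_hex_chars hex)

-- ===== LEMMAS AND PROOFS =====

-- A's loop decides "every character of l is in valid".
theorem validHexLoopA_eq_all (V l : List Char) :
    validHexLoopA V l true = l.all (fun c => V.contains c) := by
  induction l with
  | nil => rfl
  | cons c cs ih =>
    simp only [validHexLoopA, List.all_cons, ih]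
    by_cases hc : c ∈ V
    · simp [hc]
    · simp [hc]

-- Σ_{c ∈ V} [c = x] = [x ∈ V] when V has no duplicates.
theorem sum_indicator_eq (x : Char) (V : List Char) (h : V.Nodup) :
    (V.map (fun c => if x == c then 1 else 0)).sum = (if V.contains x then 1 else 0) := by
  induction V with
  | nil => simp
  | cons v vs ih =>
    rcases List.nodup_cons.mp h with ⟨hv, hvs⟩
    rw [List.map_cons, List.sum_cons, ih hvs]
    by_cases hvx : x = v
    · subst hvx
      simp [hv]
    · simp [hvx]

-- Σ_{c ∈ V} l.count c = countP (· ∈ V) l when V has no duplicates.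
theorem sum_counts_eq (V : List Char) (h : V.Nodup) (l : List Char) :
    (V.map (fun c => l.count c)).sum = l.countP (fun x => V.contains x) := by
  induction l with
  | nil => simp
  | cons x xs ih =>
    have hsplit :
        (V.map (fun c => (x :: xs).count c)).sum
          = (V.map (fun c => xs.count c)).sum
            + (V.map (fun c => if x == c then 1 else 0)).sum := by
      simp only [List.count_cons, List.sum_map_add]
    rw [hsplit, ih, sum_indicator_eq x V h, List.countP_cons]

-- countP p l = l.length exactly when every element satisfies p.
theorem decide_countP_eq_all (p : Char → Bool) (l : List Char) :
    decide (l.countP p = l.length) = l.all p := by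
  by_cases h : l.countP p = l.length
  · rw [decide_eq_true h]
    exact (List.all_eq_true.mpr (fun a ha => List.countP_eq_length.mp h a ha)).symm
  · rw [decide_eq_false h]
    have hna : l.all p ≠ true :=
      fun hall => h (List.countP_eq_length.mpr (List.all_eq_true.mp hall))
    exact (Bool.eq_false_iff.mpr hna).symm

-- ===== VERDICT (by name: the statement is the Claim_ definition above) =====
theorem valid_hex_chars_spec : Claim_equal_valid_hex_chars := by
  intro hex _
  unfold Spec_valid_hex_chars valid_hex_chars valid_hex_chars_alt
  have hnd : ("1234567890abcdefABCDEF".toList).Nodup := by decide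
  rw [validHexLoopA_eq_all, sum_counts_eq _ hnd hex.toList, decide_countP_eq_all]
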